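-- pv_equiv track=rewrite | github.com/theratty/genetic-algorithm | src/helper/helper_functions.py | calc_full_overlapsing_sum
-- ===== SOURCE A (Python) =====
-- def calc_two_rect_overlapsing_field(rect1, rect2):
--     x_overlap = max(0, min(rect1[2], rect2[2]) - max(rect1[0], rect2[0]) + 1)
--     y_overlap = max(0, min(rect1[3], rect2[3]) - max(rect1[1], rect2[1]) + 1)
--     return x_overlap * y_overlap
--
-- def calc_full_overlapsing_sum(individual, data, power=1):
--     sum_of_overlapsed_field = 0
--     for first in range(len(individual)):
--         if individual[first]["e"] == 0:
--             continue
--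
--         first_x_1 = individual[first]["x"]
--         first_y_1 = individual[first]["y"]
--         if individual[first]["r"] == 0:
--             first_x_2 = first_x_1 + data[first]["width"] - 1
--             first_y_2 = first_y_1 + data[first]["height"] - 1
--         else:
--             first_x_2 = first_x_1 + data[first]["height"] - 1
--             first_y_2 = first_y_1 + data[first]["width"] - 1
--
--         rect1 = [first_x_1, first_y_1, first_x_2, first_y_2]
--
--         for second in range(first + 1, len(individual)):
--             if individual[second]["e"] == 0:
--                 continue
--
--             second_x_1 = individual[second]["x"]
--             second_y_1 = individual[second]["y"]
--             if individual[second]["r"] == 0: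
--                 second_x_2 = second_x_1 + data[second]["width"] - 1
--                 second_y_2 = second_y_1 + data[second]["height"] - 1
--             else:
--                 second_x_2 = second_x_1 + data[second]["height"] - 1
--                 second_y_2 = second_y_1 + data[second]["width"] - 1
--
--             rect2 = [second_x_1, second_y_1, second_x_2, second_y_2]
--
--             sum_of_overlapsed_field = sum_of_overlapsed_field + calc_two_rect_overlapsing_field(rect1, rect2)**power
--
--     return sum_of_overlapsed_field
-- ===== SOURCE B (Python) =====
-- def calc_two_rect_overlapsing_field(rect1, rect2):
--     x_overlap = max(0, min(rect1[2], rect2[2]) - max(rect1[0], rect2[0]) + 1)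
--     y_overlap = max(0, min(rect1[3], rect2[3]) - max(rect1[1], rect2[1]) + 1)
--     return x_overlap * y_overlap
--
-- def calc_full_overlapsing_sum(individual, data, power=1):
--     # build the table of enabled rectangles' bounding boxes
--     rects = []
--     for ind, d in zip(individual, data):
--         if ind["e"] == 0:
--             continue
--         x1, y1 = ind["x"], ind["y"]
--         if ind["r"] == 0:
--             rects.append([x1, y1, x1 + d["width"] - 1, y1 + d["height"] - 1])
--         else:
--             rects.append([x1, y1, x1 + d["height"] - 1, y1 + d["width"] - 1])
--
--     # divide and conquer: pairs(rs) = pairs(left) + pairs(right) + cross(left, right)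
--     def pair_sum(rs):
--         if len(rs) < 2:
--             return 0
--         mid = len(rs) // 2
--         left, right = rs[:mid], rs[mid:]
--         cross = sum(calc_two_rect_overlapsing_field(a, b) ** power
--                     for a in left for b in right)
--         return pair_sum(left) + pair_sum(right) + cross
--
--     return pair_sum(rects)
-- ===== Notes on version B (the rewrite author's own statement) =====
-- stated objective: alternative
-- what changed: B first builds the enabled rectangles' bounding boxes in one pass over zip(individual, data), then computes the pairwise sum by divide and conquer: recursively split the table into halves and add left-half pairs, right-half pairs and the left-times-right cross sum, replacing A's nested index-range loops that re-derive each second rectangle's box and re-test 'e' inside the inner loop.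
import Mathlib
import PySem

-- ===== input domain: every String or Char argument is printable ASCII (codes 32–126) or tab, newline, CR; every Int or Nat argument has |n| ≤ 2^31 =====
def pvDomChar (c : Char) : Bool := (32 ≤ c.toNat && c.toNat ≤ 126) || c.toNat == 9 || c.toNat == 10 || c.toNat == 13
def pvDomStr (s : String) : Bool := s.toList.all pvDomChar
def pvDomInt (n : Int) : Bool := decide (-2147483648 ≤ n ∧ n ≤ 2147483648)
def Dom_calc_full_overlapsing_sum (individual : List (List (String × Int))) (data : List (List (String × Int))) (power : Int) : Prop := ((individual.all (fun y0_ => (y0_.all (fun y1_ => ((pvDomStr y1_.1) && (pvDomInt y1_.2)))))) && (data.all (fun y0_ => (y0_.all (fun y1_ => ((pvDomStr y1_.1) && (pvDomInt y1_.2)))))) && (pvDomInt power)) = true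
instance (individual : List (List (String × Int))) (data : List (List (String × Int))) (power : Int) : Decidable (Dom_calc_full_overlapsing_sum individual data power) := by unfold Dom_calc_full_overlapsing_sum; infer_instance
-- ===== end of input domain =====

-- B builds the enabled-rectangle table in one pass over zip(individual, data), then computes the
-- pairwise overlap sum by divide and conquer (left pairs + right pairs + cross sum) instead of A's
-- nested index loops (alternative decomposition, same asymptotic cost).


-- ===== PORT A =====
-- dict lookup d[k] (first match; total under Pre_, which guarantees the key is present)
def pvKey (d : List (String × Int)) (k : String) : Int := (d.lookup k).getD 0

-- module helper calc_two_rect_overlapsing_field; a rect [x1,y1,x2,y2] is the tuple (x1,y1,x2,y2)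
def calc_two_rect_overlapsing_field (rect1 rect2 : Int × Int × Int × Int) : Int :=
  let x_overlap := max 0 (min rect1.2.2.1 rect2.2.2.1 - max rect1.1 rect2.1 + 1)
  let y_overlap := max 0 (min rect1.2.2.2 rect2.2.2.2 - max rect1.2.1 rect2.2.1 + 1)
  x_overlap * y_overlap

-- A's duplicated rect-construction block (also B's per-row computation in pass 1)
def pvMkRect (ind dat : List (String × Int)) : Int × Int × Int × Int :=
  let x1 := pvKey ind "x"
  let y1 := pvKey ind "y"
  if pvKey ind "r" == 0 then
    (x1, y1, x1 + pvKey dat "width" - 1, y1 + pvKey dat "height" - 1)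
  else
    (x1, y1, x1 + pvKey dat "height" - 1, y1 + pvKey dat "width" - 1)

def calc_full_overlapsing_sum (individual : List (List (String × Int))) (data : List (List (String × Int))) (power : Int) : Int :=
  (PySem.List.pyRange 0 (PySem.List.len individual) 1).foldl (fun acc first =>
    if pvKey (PySem.List.pyGetD individual first []) "e" == 0 then acc
    else
      let rect1 := pvMkRect (PySem.List.pyGetD individual first []) (PySem.List.pyGetD data first [])
      (PySem.List.pyRange (first + 1) (PySem.List.len individual) 1).foldl (fun acc2 second =>
        if pvKey (PySem.List.pyGetD individual second []) "e" == 0 then acc2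
        else acc2 + (calc_two_rect_overlapsing_field rect1
               (pvMkRect (PySem.List.pyGetD individual second [])
                         (PySem.List.pyGetD data second []))) ^ power.toNat) acc) 0

-- ===== PORT B =====
-- pass 1 of Source B: the table of enabled rectangles, one pass over zip(individual, data)
def pvRects : List ((List (String × Int)) × (List (String × Int))) → List (Int × Int × Int × Int)
  | [] => []
  | (ind, dat) :: rest =>
      if pvKey ind "e" == 0 then pvRects rest else pvMkRect ind dat :: pvRects rest

-- Source B's pair_sum: divide and conquer over the rectangle table
def pvPairDC (p : Nat) (rs : List (Int × Int × Int × Int)) : Int :=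
  if _h : rs.length < 2 then 0
  else
    let mid := rs.length / 2
    let left := rs.take mid
    let right := rs.drop mid
    let cross := (left.map (fun a =>
        (right.map (fun b => calc_two_rect_overlapsing_field a b ^ p)).sum)).sum
    pvPairDC p left + pvPairDC p right + cross
termination_by rs.length
decreasing_by
  · simp only [List.length_take]; omega
  · simp only [List.length_drop]; omega

def calc_full_overlapsing_sum_alt (individual : List (List (String × Int))) (data : List (List (String × Int))) (power : Int) : Int :=
  pvPairDC power.toNat (pvRects (individual.zip data))


-- ===== PRECONDITION & SPEC =====
-- Pre_ = exactly the inputs on which the Python A returns an int: every row of individual has key "e"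
-- (and keys "x","y","r" when that row is enabled), every enabled index has a data row with
-- "width"/"height" (else KeyError/IndexError), and power is non-negative unless fewer than two rows
-- are enabled (a negative power makes '**' raise ZeroDivisionError or produce a float).
def Pre_calc_full_overlapsing_sum (individual : List (List (String × Int))) (data : List (List (String × Int))) (power : Int) : Prop :=
  (∀ d ∈ individual, (d.lookup "e").isSome ∧
      ((d.lookup "e").getD 0 ≠ 0 →
        (d.lookup "x").isSome ∧ (d.lookup "y").isSome ∧ (d.lookup "r").isSome)) ∧
  (∀ i : Nat, i < individual.length →
      ((individual.getD i []).lookup "e").getD 0 ≠ 0 →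
      i < data.length ∧ ((data.getD i []).lookup "width").isSome ∧ ((data.getD i []).lookup "height").isSome) ∧
  (0 ≤ power ∨ individual.countP (fun d => !((d.lookup "e").getD 0 == 0)) < 2)
instance (individual : List (List (String × Int))) (data : List (List (String × Int))) (power : Int) : Decidable (Pre_calc_full_overlapsing_sum individual data power) := by unfold Pre_calc_full_overlapsing_sum; infer_instance

def pvWitness_calc_full_overlapsing_sum : (List (List (String × Int))) × (List (List (String × Int))) × Int :=
  ([[("e", 1), ("x", 0), ("y", 0), ("r", 0)], [("e", 1), ("x", 1), ("y", 1), ("r", 1)]],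
   [[("width", 3), ("height", 2)], [("width", 2), ("height", 2)]], 1)

def Spec_calc_full_overlapsing_sum (individual : List (List (String × Int))) (data : List (List (String × Int))) (power : Int) (out : Int) : Prop := out = calc_full_overlapsing_sum_alt individual data power
instance (individual : List (List (String × Int))) (data : List (List (String × Int))) (power : Int) (out : Int) : Decidable (Spec_calc_full_overlapsing_sum individual data power out) := by unfold Spec_calc_full_overlapsing_sum; infer_instance

-- ===== CLAIM (what is proved, stated in full; the proofs are below) =====
def Claim_equal_calc_full_overlapsing_sum : Prop := ∀ (individual : List (List (String × Int))) (data : List (List (String × Int))) (power : Int), Dom_calc_full_overlapsing_sum individual data power → Pre_calc_full_overlapsing_sum individual data power → Spec_calc_full_overlapsing_sum individual data power (calc_full_overlapsing_sum individual data power)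

-- ===== LEMMAS AND PROOFS =====
-- the indexed rectangle A computes at index i
def pvRA (xs ds : List (List (String × Int))) (i : Int) : Int × Int × Int × Int :=
  pvMkRect (PySem.List.pyGetD xs i []) (PySem.List.pyGetD ds i [])

-- the reference pair sum both sides are reduced to
def pvPairSum (p : Nat) : List (Int × Int × Int × Int) → Int
  | [] => 0
  | first :: rest =>
      (rest.map (fun second => calc_two_rect_overlapsing_field first second ^ p)).sum + pvPairSum p rest

theorem pvPairSum_append (p : Nat) (L R : List (Int × Int × Int × Int)) :
    pvPairSum p (L ++ R) = pvPairSum p L + pvPairSum p R +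
      (L.map (fun a => (R.map (fun b => calc_two_rect_overlapsing_field a b ^ p)).sum)).sum := by
  induction L with
  | nil => simp [pvPairSum]
  | cons a L ih =>
      simp only [List.cons_append, pvPairSum, ih, List.map_append, List.sum_append, List.map_cons,
        List.sum_cons]
      ring

theorem pvPairDC_eq (p : Nat) : ∀ (n : Nat) (rs : List (Int × Int × Int × Int)),
    rs.length ≤ n → pvPairDC p rs = pvPairSum p rs := by
  intro n
  induction n with
  | zero =>
      intro rs h
      have : rs = [] := List.eq_nil_of_length_eq_zero (by omega)
      subst this
      rw [pvPairDC]
      simp [pvPairSum]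
  | succ n ih =>
      intro rs h
      rw [pvPairDC]
      by_cases h2 : rs.length < 2
      · rw [dif_pos h2]
        match rs, h2 with
        | [], _ => simp [pvPairSum]
        | [a], _ => simp [pvPairSum]
      · rw [dif_neg h2]
        show pvPairDC p (rs.take (rs.length / 2)) + pvPairDC p (rs.drop (rs.length / 2)) +
            ((rs.take (rs.length / 2)).map (fun a =>
              ((rs.drop (rs.length / 2)).map (fun b => calc_two_rect_overlapsing_field a b ^ p)).sum)).sum
          = pvPairSum p rs
        have hmid1 : 1 ≤ rs.length / 2 := by omega
        have hmid2 : rs.length / 2 < rs.length := by omega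
        have hl : (rs.take (rs.length / 2)).length ≤ n := by
          simp only [List.length_take]; omega
        have hr : (rs.drop (rs.length / 2)).length ≤ n := by
          simp only [List.length_drop]; omega
        rw [ih _ hl, ih _ hr]
        conv_rhs => rw [← List.take_append_drop (rs.length / 2) rs]
        rw [pvPairSum_append]

theorem pv_inner_fuel (xs ds : List (List (String × Int))) (f : Int × Int × Int × Int → Int)
    (H : ∀ i : Nat, i < xs.length → ¬ (pvKey (xs.getD i []) "e" == 0) = true → i < ds.length) :
    ∀ (k a : Nat), xs.length - a ≤ k →
      ((PySem.List.pyRange (a : Int) (xs.length : Int) 1).map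
        (fun j => if pvKey (PySem.List.pyGetD xs j []) "e" == 0 then 0 else f (pvRA xs ds j))).sum
      = ((pvRects ((xs.drop a).zip (ds.drop a))).map f).sum := by
  intro k
  induction k with
  | zero =>
      intro a hk
      have ha : xs.length ≤ a := by omega
      rw [PySem.List.pyRange_one_eq_nil (by exact_mod_cast ha),
          List.drop_eq_nil_of_le ha]
      simp [pvRects]
  | succ k ih =>
      intro a hk
      by_cases ha : a < xs.length
      · rw [PySem.List.pyRange_one_cons (by exact_mod_cast ha)]
        have hcast : ((a : Int) + 1) = ((a + 1 : Nat) : Int) := by push_cast; ring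
        rw [List.map_cons, List.sum_cons, hcast, ih (a + 1) (by omega)]
        have hgx : PySem.List.pyGetD xs ((a : Nat) : Int) [] = xs[a] := by
          simp [PySem.List.pyGetD_natCast, List.getD_eq_getElem?_getD, List.getElem?_eq_getElem ha]
        by_cases hd : a < ds.length
        · have hgd : PySem.List.pyGetD ds ((a : Nat) : Int) [] = ds[a] := by
            simp [PySem.List.pyGetD_natCast, List.getD_eq_getElem?_getD, List.getElem?_eq_getElem hd]
          have hz : (xs.drop a).zip (ds.drop a)
              = (xs[a], ds[a]) :: ((xs.drop (a+1)).zip (ds.drop (a+1))) := by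
            rw [List.drop_eq_getElem_cons ha, List.drop_eq_getElem_cons hd, List.zip_cons_cons]
          rw [hz]
          by_cases he : (pvKey xs[a] "e" == 0) = true
          · rw [if_pos (by rw [hgx]; exact he)]
            simp only [pvRects, if_pos he]
            omega
          · rw [if_neg (by rw [hgx]; exact he)]
            simp only [pvRects, if_neg he, List.map_cons, List.sum_cons]
            rw [pvRA, hgx, hgd]
        · have he : (pvKey (xs.getD a []) "e" == 0) = true := by
            by_contra hne
            exact hd (H a ha (by simpa using hne))
          have he' : (pvKey xs[a] "e" == 0) = true := by
            rwa [List.getD_eq_getElem?_getD, List.getElem?_eq_getElem ha] at he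
          have hdrop : ds.drop a = [] := List.drop_eq_nil_of_le (by omega)
          have hdrop' : ds.drop (a + 1) = [] := List.drop_eq_nil_of_le (by omega)
          rw [hdrop, hdrop', List.zip_nil_right, List.zip_nil_right]
          simp [hgx, he']
      · have ha' : xs.length ≤ a := by omega
        rw [PySem.List.pyRange_one_eq_nil (by exact_mod_cast ha'),
            List.drop_eq_nil_of_le ha']
        simp [pvRects]

theorem pv_main_fuel (xs ds : List (List (String × Int))) (p : Nat)
    (H : ∀ i : Nat, i < xs.length → ¬ (pvKey (xs.getD i []) "e" == 0) = true → i < ds.length) :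
    ∀ (k a : Nat), xs.length - a ≤ k →
      ((PySem.List.pyRange (a : Int) (xs.length : Int) 1).map
        (fun i => if pvKey (PySem.List.pyGetD xs i []) "e" == 0 then 0 else
          ((PySem.List.pyRange (i + 1) (xs.length : Int) 1).map
            (fun j => if pvKey (PySem.List.pyGetD xs j []) "e" == 0 then 0 else
              calc_two_rect_overlapsing_field (pvRA xs ds i) (pvRA xs ds j) ^ p)).sum)).sum
      = pvPairSum p (pvRects ((xs.drop a).zip (ds.drop a))) := by
  intro k
  induction k with
  | zero =>
      intro a hk
      have ha : xs.length ≤ a := by omega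
      rw [PySem.List.pyRange_one_eq_nil (by exact_mod_cast ha),
          List.drop_eq_nil_of_le ha]
      simp [pvRects, pvPairSum]
  | succ k ih =>
      intro a hk
      by_cases ha : a < xs.length
      · rw [PySem.List.pyRange_one_cons (by exact_mod_cast ha)]
        have hcast : ((a : Int) + 1) = ((a + 1 : Nat) : Int) := by push_cast; ring
        rw [List.map_cons, List.sum_cons, hcast, ih (a + 1) (by omega)]
        have hgx : PySem.List.pyGetD xs ((a : Nat) : Int) [] = xs[a] := by
          simp [PySem.List.pyGetD_natCast, List.getD_eq_getElem?_getD, List.getElem?_eq_getElem ha]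
        by_cases hd : a < ds.length
        · have hgd : PySem.List.pyGetD ds ((a : Nat) : Int) [] = ds[a] := by
            simp [PySem.List.pyGetD_natCast, List.getD_eq_getElem?_getD, List.getElem?_eq_getElem hd]
          have hz : (xs.drop a).zip (ds.drop a)
              = (xs[a], ds[a]) :: ((xs.drop (a+1)).zip (ds.drop (a+1))) := by
            rw [List.drop_eq_getElem_cons ha, List.drop_eq_getElem_cons hd, List.zip_cons_cons]
          rw [hz]
          by_cases he : (pvKey xs[a] "e" == 0) = true
          · rw [if_pos (by rw [hgx]; exact he)]
            simp only [pvRects, if_pos he]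
            omega
          · rw [if_neg (by rw [hgx]; exact he)]
            rw [pv_inner_fuel xs ds (fun b => calc_two_rect_overlapsing_field (pvRA xs ds (a : Int)) b ^ p) H (xs.length) (a + 1) (by omega)]
            simp only [pvRects, if_neg he, pvPairSum]
            rw [pvRA, hgx, hgd]
        · have he : (pvKey (xs.getD a []) "e" == 0) = true := by
            by_contra hne
            exact hd (H a ha (by simpa using hne))
          have he' : (pvKey xs[a] "e" == 0) = true := by
            rwa [List.getD_eq_getElem?_getD, List.getElem?_eq_getElem ha] at he
          have hdrop : ds.drop a = [] := List.drop_eq_nil_of_le (by omega)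
          have hdrop' : ds.drop (a + 1) = [] := List.drop_eq_nil_of_le (by omega)
          rw [hdrop, hdrop', List.zip_nil_right, List.zip_nil_right]
          rw [if_pos (by rw [hgx]; exact he')]
          simp [pvRects, pvPairSum]
      · have ha' : xs.length ≤ a := by omega
        rw [PySem.List.pyRange_one_eq_nil (by exact_mod_cast ha'),
            List.drop_eq_nil_of_le ha']
        simp [pvRects, pvPairSum]

-- ===== VERDICT (by name: the statement is the Claim_ definition above) =====
theorem calc_full_overlapsing_sum_spec : Claim_equal_calc_full_overlapsing_sum := by
  intro xs ds power _ hpre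
  obtain ⟨_, h2, _⟩ := hpre
  have H : ∀ i : Nat, i < xs.length → ¬ (pvKey (xs.getD i []) "e" == 0) = true → i < ds.length := by
    intro i hi hne
    exact (h2 i hi (by simpa [pvKey] using hne)).1
  unfold Spec_calc_full_overlapsing_sum
  have hA : calc_full_overlapsing_sum xs ds power
      = ((PySem.List.pyRange 0 (xs.length : Int) 1).map
          (fun i => if pvKey (PySem.List.pyGetD xs i []) "e" == 0 then 0 else
            ((PySem.List.pyRange (i + 1) (xs.length : Int) 1).map
              (fun j => if pvKey (PySem.List.pyGetD xs j []) "e" == 0 then 0 else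
                calc_two_rect_overlapsing_field (pvRA xs ds i) (pvRA xs ds j) ^ power.toNat)).sum)).sum := by
    rw [calc_full_overlapsing_sum, PySem.List.len_eq]
    have hfun : (fun (acc first : Int) =>
        if pvKey (PySem.List.pyGetD xs first []) "e" == 0 then acc
        else
          let rect1 := pvMkRect (PySem.List.pyGetD xs first []) (PySem.List.pyGetD ds first [])
          (PySem.List.pyRange (first + 1) (xs.length : Int) 1).foldl (fun acc2 second =>
            if pvKey (PySem.List.pyGetD xs second []) "e" == 0 then acc2
            else acc2 + (calc_two_rect_overlapsing_field rect1
                   (pvMkRect (PySem.List.pyGetD xs second [])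
                             (PySem.List.pyGetD ds second []))) ^ power.toNat) acc)
        = (fun (acc i : Int) =>
          acc + (if pvKey (PySem.List.pyGetD xs i []) "e" == 0 then 0 else
            ((PySem.List.pyRange (i + 1) (xs.length : Int) 1).map
              (fun j => if pvKey (PySem.List.pyGetD xs j []) "e" == 0 then 0 else
                calc_two_rect_overlapsing_field (pvRA xs ds i) (pvRA xs ds j) ^ power.toNat)).sum)) := by
      funext acc i
      by_cases hc : (pvKey (PySem.List.pyGetD xs i []) "e" == 0) = true
      · rw [if_pos hc, if_pos hc]; ring
      · rw [if_neg hc, if_neg hc]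
        show (PySem.List.pyRange (i + 1) (xs.length : Int) 1).foldl (fun acc2 second =>
            if pvKey (PySem.List.pyGetD xs second []) "e" == 0 then acc2
            else acc2 + (calc_two_rect_overlapsing_field
                   (pvMkRect (PySem.List.pyGetD xs i []) (PySem.List.pyGetD ds i []))
                   (pvMkRect (PySem.List.pyGetD xs second [])
                             (PySem.List.pyGetD ds second []))) ^ power.toNat) acc = _
        have hfun2 : (fun (acc2 second : Int) =>
            if pvKey (PySem.List.pyGetD xs second []) "e" == 0 then acc2
            else acc2 + (calc_two_rect_overlapsing_field
                   (pvMkRect (PySem.List.pyGetD xs i []) (PySem.List.pyGetD ds i []))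
                   (pvMkRect (PySem.List.pyGetD xs second [])
                             (PySem.List.pyGetD ds second []))) ^ power.toNat)
            = (fun (acc2 j : Int) =>
              acc2 + (if pvKey (PySem.List.pyGetD xs j []) "e" == 0 then 0 else
                calc_two_rect_overlapsing_field (pvRA xs ds i) (pvRA xs ds j) ^ power.toNat)) := by
          funext acc2 j
          by_cases hcj : (pvKey (PySem.List.pyGetD xs j []) "e" == 0) = true
          · rw [if_pos hcj, if_pos hcj]; ring
          · rw [if_neg hcj, if_neg hcj]; rfl
        rw [hfun2, PySem.List.foldl_add]
    rw [hfun, PySem.List.foldl_add]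
    ring
  have hB : calc_full_overlapsing_sum_alt xs ds power
      = pvPairSum power.toNat (pvRects (xs.zip ds)) := by
    rw [calc_full_overlapsing_sum_alt,
        pvPairDC_eq power.toNat (pvRects (xs.zip ds)).length _ (le_refl _)]
  rw [hA, hB]
  have := pv_main_fuel xs ds power.toNat H xs.length 0 (by omega)
  simpa using this
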